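-- pv_equiv track=rewrite | github.com/jesika545/crypto-stegano | konversi.py | hex_to_decimal_steps
-- ===== SOURCE A (Python) =====
-- def hex_to_decimal_steps(hstr):
--     s = hstr.strip().upper()
--     simbol = "0123456789ABCDEF"
--     steps = []
--     total = 0
--     n = len(s)
--     for i, ch in enumerate(reversed(s)):
--         val_digit = simbol.index(ch)
--         val = val_digit * (16 ** i)
--         steps.append(f"{ch} × 16^{i} = {val} (digit value {val_digit})")
--         total += val
--     formula = " + ".join([f"{s[j]}×16^{n-j-1}" for j in range(n)])
--     full_steps = "Langkah (Hexa -> Desimal):\n" + "\n".join(reversed(steps)) + f"\n\nRumus: {formula}\nTotal = {total}"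
--     return total, full_steps
-- ===== SOURCE B (Python) =====
-- def hex_to_decimal_steps(hstr):
--     s = hstr.strip().upper()
--     n = len(s)
--     steps = []
--     parts = []
--     total = 0
--     for j, ch in enumerate(s):
--         i = n - j - 1
--         d = "0123456789ABCDEF".index(ch)
--         total = total * 16 + d
--         steps.append(f"{ch} × 16^{i} = {d * 16 ** i} (digit value {d})")
--         parts.append(f"{ch}×16^{i}")
--     full_steps = ("Langkah (Hexa -> Desimal):\n" + "\n".join(steps)
--                   + "\n\nRumus: " + " + ".join(parts) + f"\nTotal = {total}")
--     return total, full_steps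
-- ===== Notes on version B (the rewrite author's own statement) =====
-- stated objective: simpler
-- what changed: One forward pass builds the step lines in display order, the formula fragments and a Horner-rule total together, replacing A's reversed-enumerate loop plus explicit reversal of steps plus a second comprehension pass for the formula.
import Mathlib
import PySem

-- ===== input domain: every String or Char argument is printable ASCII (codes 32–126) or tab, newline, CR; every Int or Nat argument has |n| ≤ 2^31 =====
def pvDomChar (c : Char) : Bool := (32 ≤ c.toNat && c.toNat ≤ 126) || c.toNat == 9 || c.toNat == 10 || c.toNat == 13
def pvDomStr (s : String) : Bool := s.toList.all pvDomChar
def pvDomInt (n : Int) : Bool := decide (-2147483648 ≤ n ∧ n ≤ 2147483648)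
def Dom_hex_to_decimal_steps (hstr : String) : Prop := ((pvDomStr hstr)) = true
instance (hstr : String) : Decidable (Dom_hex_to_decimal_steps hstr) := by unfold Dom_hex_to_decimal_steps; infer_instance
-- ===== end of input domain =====

-- B replaces A's reversed-enumerate loop + explicit steps reversal + second formula pass by one
-- forward pass (steps in display order, formula fragments and a Horner-rule total in the same
-- loop); objective: simpler (same O(n) cost).

-- ===== PORT A =====
-- the digit alphabet 'simbol'
def pvSimbol : List Char := "0123456789ABCDEF".toList

-- simbol.index(ch); Python raises ValueError on a non-hex char (excluded by Pre_),
-- the port returns 0 there (nothing is claimed on such inputs)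
def pvDigitVal (ch : Char) : Int := ((PySem.List.index? pvSimbol ch).getD 0 : Nat)

-- the f-string f"{ch} × 16^{i} = {val} (digit value {d})" (appears verbatim in both Pythons)
def pvStepLine (ch : Char) (i : Int) (val : Int) (d : Int) : List Char :=
  [ch] ++ " × 16^".toList ++ PySem.Int.toChars i ++ " = ".toList ++ PySem.Int.toChars val
    ++ " (digit value ".toList ++ PySem.Int.toChars d ++ ")".toList

def hex_to_decimal_steps (hstr : String) : Int × String :=
  let s := PySem.Chars.upper (PySem.Chars.strip hstr.toList)
  let n := s.length
  let st := (PySem.List.enumerate s.reverse 0).foldl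
    (fun (st : List (List Char) × Int) p =>
      let d := pvDigitVal p.2
      let val := d * 16 ^ p.1.toNat
      (st.1 ++ [pvStepLine p.2 p.1 val d], st.2 + val)) ([], 0)
  let formula := PySem.Chars.join " + ".toList
    ((PySem.List.pyRange 0 (n : Int) 1).map
      (fun j => [PySem.List.pyGetD s j ' '] ++ "×16^".toList ++ PySem.Int.toChars ((n : Int) - j - 1)))
  let full := "Langkah (Hexa -> Desimal):\n".toList ++ PySem.Chars.join "\n".toList st.1.reverse
    ++ "\n\nRumus: ".toList ++ formula ++ "\nTotal = ".toList ++ PySem.Int.toChars st.2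
  (st.2, String.ofList full)

-- ===== PORT B =====
def hex_to_decimal_steps_alt (hstr : String) : Int × String :=
  let s := PySem.Chars.upper (PySem.Chars.strip hstr.toList)
  let n := s.length
  let st := (PySem.List.enumerate s 0).foldl
    (fun (st : List (List Char) × List (List Char) × Int) p =>
      let i : Int := (n : Int) - p.1 - 1
      let d := pvDigitVal p.2
      (st.1 ++ [pvStepLine p.2 i (d * 16 ^ i.toNat) d],
       st.2.1 ++ [[p.2] ++ "×16^".toList ++ PySem.Int.toChars i],
       st.2.2 * 16 + d)) ([], [], 0)
  let full := "Langkah (Hexa -> Desimal):\n".toList ++ PySem.Chars.join "\n".toList st.1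
    ++ "\n\nRumus: ".toList ++ PySem.Chars.join " + ".toList st.2.1
    ++ "\nTotal = ".toList ++ PySem.Int.toChars st.2.2
  (st.2.2, String.ofList full)

-- ===== PRECONDITION & SPEC =====
-- Pre_: every character of hstr.strip().upper() is a hex digit; on any other character
-- Python's simbol.index(ch) raises ValueError (in A and in B alike).
def Pre_hex_to_decimal_steps (hstr : String) : Prop :=
  ((PySem.Chars.upper (PySem.Chars.strip hstr.toList)).all
    (fun c => "0123456789ABCDEF".toList.contains c)) = true
instance (hstr : String) : Decidable (Pre_hex_to_decimal_steps hstr) := by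
  unfold Pre_hex_to_decimal_steps; infer_instance
def pvWitness_hex_to_decimal_steps : String := " 1aF3 "

def Spec_hex_to_decimal_steps (hstr : String) (out : Int × String) : Prop := out = hex_to_decimal_steps_alt hstr
instance (hstr : String) (out : Int × String) : Decidable (Spec_hex_to_decimal_steps hstr out) := by unfold Spec_hex_to_decimal_steps; infer_instance

-- ===== CLAIM (what is proved, stated in full; the proofs are below) =====
def Claim_equal_hex_to_decimal_steps : Prop := ∀ (hstr : String), Dom_hex_to_decimal_steps hstr → Pre_hex_to_decimal_steps hstr → Spec_hex_to_decimal_steps hstr (hex_to_decimal_steps hstr)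

-- ===== LEMMAS AND PROOFS =====

-- A's per-digit contribution d(ch) * 16**i, read off an (index, char) pair of enumerate(reversed(s))
def pvGA (p : Int × Char) : Int := pvDigitVal p.2 * 16 ^ p.1.toNat

-- reading enumerate(reversed(s)) backwards is the forward enumeration with index j ↦ n-1-j
lemma pv_enum_rev {α : Type} (s : List α) :
    (PySem.List.enumerate s.reverse 0).reverse
      = (PySem.List.enumerate s 0).map (fun p => ((s.length : Int) - 1 - p.1, p.2)) := by
  apply List.ext_getElem
  · simp [PySem.List.length_enumerate]
  · intro i h1 h2
    simp only [List.length_reverse, PySem.List.length_enumerate] at h1 h2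
    rw [List.getElem_reverse]
    rw [PySem.List.getElem_enumerate, List.getElem_map, PySem.List.getElem_enumerate]
    simp only [List.getElem_reverse, PySem.List.length_enumerate, List.length_reverse]
    have e1 : s.length - 1 - (s.length - 1 - i) = i := by omega
    rw [Prod.mk.injEq]
    refine ⟨by omega, ?_⟩
    simp only [e1]

-- shifting the start of enumerate multiplies every 16**index contribution by 16**k
lemma pv_shift (l : List Char) (k : Nat) :
    ((PySem.List.enumerate l (k : Int)).map pvGA).sum
      = 16 ^ k * ((PySem.List.enumerate l 0).map pvGA).sum := by
  induction l generalizing k with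
  | nil => simp [PySem.List.enumerate_nil]
  | cons c t ih =>
    rw [PySem.List.enumerate_cons, PySem.List.enumerate_cons]
    have h1 : (k : Int) + 1 = ((k + 1 : Nat) : Int) := by push_cast; ring
    have h0 : (0 : Int) + 1 = ((1 : Nat) : Int) := by norm_num
    rw [h1, h0]
    simp only [List.map_cons, List.sum_cons, ih (k+1), ih 1]
    simp only [pvGA, Int.toNat_natCast, Int.toNat_zero]
    ring

-- B's Horner accumulation equals A's sum of d(ch) * 16**i over enumerate(reversed(s))
lemma pv_horner (l : List Char) : ∀ init : Int,
    l.foldl (fun t c => t * 16 + pvDigitVal c) init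
      = init * 16 ^ l.length + ((PySem.List.enumerate l.reverse 0).map pvGA).sum := by
  induction l using List.reverseRecOn with
  | nil => intro init; simp [PySem.List.enumerate_nil]
  | append_singleton t c ih =>
    intro init
    rw [List.foldl_append, List.foldl_cons, List.foldl_nil, ih]
    rw [List.reverse_append, List.reverse_singleton, List.singleton_append,
        PySem.List.enumerate_cons]
    have h0 : (0 : Int) + 1 = ((1 : Nat) : Int) := by norm_num
    rw [h0]
    simp only [List.map_cons, List.sum_cons, pv_shift, List.length_append,
      List.length_singleton, pvGA, Int.toNat_zero]
    ring

-- a fold over enumerate that ignores the index is a fold over the list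
lemma pv_fold_snd {α β : Type} (h : β → α → β) (l : List α) (k : Int) (init : β) :
    (PySem.List.enumerate l k).foldl (fun a p => h a p.2) init = l.foldl h init := by
  induction l generalizing k init with
  | nil => simp [PySem.List.enumerate_nil]
  | cons c t ih => rw [PySem.List.enumerate_cons, List.foldl_cons, List.foldl_cons, ih]

-- A's reversed list of step lines = B's forward-built list of step lines
lemma pv_steps (s : List Char) :
    (List.foldl (fun a (p : Int × Char) =>
        a ++ [pvStepLine p.2 p.1 (pvDigitVal p.2 * 16 ^ p.1.toNat) (pvDigitVal p.2)]) []
        (PySem.List.enumerate s.reverse)).reverse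
      = List.foldl (fun a (p : Int × Char) =>
          a ++ [pvStepLine p.2 ((s.length : Int) - p.1 - 1)
                  (pvDigitVal p.2 * 16 ^ ((s.length : Int) - p.1 - 1).toNat) (pvDigitVal p.2)]) []
          (PySem.List.enumerate s) := by
  rw [PySem.List.foldl_append_singleton_eq_map, PySem.List.foldl_append_singleton_eq_map]
  simp only [List.nil_append]
  rw [← List.map_reverse, pv_enum_rev, List.map_map]
  apply List.map_congr_left
  intro p _
  simp only [Function.comp_apply]
  rw [sub_right_comm]

-- A's total = B's Horner total
lemma pv_total (s : List Char) :
    List.foldl (fun a (p : Int × Char) => a + pvDigitVal p.2 * 16 ^ p.1.toNat) 0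
        (PySem.List.enumerate s.reverse)
      = List.foldl (fun a (p : Int × Char) => a * 16 + pvDigitVal p.2) 0
          (PySem.List.enumerate s) := by
  rw [PySem.List.foldl_add (g := fun p : Int × Char => pvDigitVal p.2 * 16 ^ p.1.toNat)]
  rw [pv_fold_snd (h := fun (t : Int) (c : Char) => t * 16 + pvDigitVal c)]
  rw [pv_horner s 0]
  rw [show pvGA = (fun p : Int × Char => pvDigitVal p.2 * 16 ^ p.1.toNat) from rfl]
  ring

-- A's range(n) comprehension for the formula = B's formula fragments built in the loop
lemma pv_formula (s : List Char) :
    (PySem.List.pyRange 0 (s.length : Int) 1).map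
        (fun j => [PySem.List.pyGetD s j ' '] ++ "×16^".toList
                    ++ PySem.Int.toChars ((s.length : Int) - j - 1))
      = List.foldl (fun a (p : Int × Char) =>
          a ++ [[p.2] ++ "×16^".toList ++ PySem.Int.toChars ((s.length : Int) - p.1 - 1)]) []
          (PySem.List.enumerate s) := by
  rw [PySem.List.foldl_append_singleton_eq_map, List.nil_append]
  rw [PySem.List.enumerate_eq_map_pyRange (d := ' '), List.map_map]
  rfl

lemma pv_main (hstr : String) : hex_to_decimal_steps hstr = hex_to_decimal_steps_alt hstr := by
  unfold hex_to_decimal_steps hex_to_decimal_steps_alt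
  set s := PySem.Chars.upper (PySem.Chars.strip hstr.toList) with hs
  simp only []
  rw [PySem.List.foldl_prod_mk
        (f := fun (a : List (List Char)) (p : Int × Char) =>
          a ++ [pvStepLine p.2 p.1 (pvDigitVal p.2 * 16 ^ p.1.toNat) (pvDigitVal p.2)])
        (g := fun (a : Int) (p : Int × Char) => a + pvDigitVal p.2 * 16 ^ p.1.toNat)]
  rw [PySem.List.foldl_prod_mk
        (f := fun (a : List (List Char)) (p : Int × Char) =>
          a ++ [pvStepLine p.2 ((s.length : Int) - p.1 - 1)
                 (pvDigitVal p.2 * 16 ^ ((s.length : Int) - p.1 - 1).toNat) (pvDigitVal p.2)])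
        (g := fun (a : List (List Char) × Int) (p : Int × Char) =>
          (a.1 ++ [[p.2] ++ "×16^".toList ++ PySem.Int.toChars ((s.length : Int) - p.1 - 1)],
           a.2 * 16 + pvDigitVal p.2))]
  rw [PySem.List.foldl_prod_mk
        (f := fun (a : List (List Char)) (p : Int × Char) =>
          a ++ [[p.2] ++ "×16^".toList ++ PySem.Int.toChars ((s.length : Int) - p.1 - 1)])
        (g := fun (a : Int) (p : Int × Char) => a * 16 + pvDigitVal p.2)]
  dsimp only
  rw [pv_total s, pv_steps s, pv_formula s]

-- ===== VERDICT (by name: the statement is the Claim_ definition above) =====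
theorem hex_to_decimal_steps_spec : Claim_equal_hex_to_decimal_steps := by
  intro hstr _ _
  unfold Spec_hex_to_decimal_steps
  exact pv_main hstr
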